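-- pv_equiv track=rewrite | github.com/thu-vis/ActLocalizer | application/views/database_utils/video.py | find_pose
-- ===== SOURCE A (Python) =====
-- def find_pose(poses, poseid):
--     if len(poses[poseid]) > 0:
--         return poses[poseid]
--     pmax = len(poses) - 1
--     i, j = 1, 1
--     while i < 20:
--         if poseid - i < 0:
--             i = 100
--             break
--         if len(poses[poseid - i]) > 0:
--             break
--         i += 1
--     while j < 20:
--         if poseid + j > pmax:
--             j = 100
--             break
--         if len(poses[poseid + j]) > 0:
--             break
--         j += 1
--
--     if i > 19 and j > 19:
--         return []
--     if i < j:
--         return poses[poseid - i]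
--     else:
--         return poses[poseid + j]
-- ===== SOURCE B (Python) =====
-- def find_pose(poses, poseid):
--     if poses[poseid]:
--         return poses[poseid]
--     last = len(poses) - 1
--     for d in range(1, 20):
--         if poseid + d <= last and poses[poseid + d]:
--             return poses[poseid + d]
--         if poseid - d >= 0 and poses[poseid - d]:
--             return poses[poseid - d]
--     return []
-- ===== Notes on version B (the rewrite author's own statement) =====
-- stated objective: simpler
-- what changed: A single expanding-radius loop (forward checked before backward at each distance, returning the first hit) replaces A's two independent directional while-loops with sentinel values 100/20 and the final i/j comparison.
import Mathlib
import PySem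

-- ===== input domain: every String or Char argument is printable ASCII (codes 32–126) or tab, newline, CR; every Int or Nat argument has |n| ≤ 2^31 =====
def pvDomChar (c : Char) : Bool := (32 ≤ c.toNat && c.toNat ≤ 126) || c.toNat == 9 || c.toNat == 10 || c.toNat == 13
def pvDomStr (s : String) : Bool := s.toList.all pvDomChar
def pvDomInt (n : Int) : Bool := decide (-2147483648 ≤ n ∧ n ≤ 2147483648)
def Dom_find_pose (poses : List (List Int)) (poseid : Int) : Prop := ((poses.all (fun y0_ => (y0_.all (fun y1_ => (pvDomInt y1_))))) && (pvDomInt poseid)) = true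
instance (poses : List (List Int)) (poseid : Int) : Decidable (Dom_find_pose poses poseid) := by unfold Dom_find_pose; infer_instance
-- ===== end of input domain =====

-- B replaces A's two independent directional while-loops (with sentinels 100/20 and a
-- final i/j comparison) by one expanding-radius loop, forward checked first at each
-- distance; objective: simpler.

-- ===== PORT A =====
-- poses[idx] under Pre_ is always in range; .getD [] is never the value used there
def pvAt (poses : List (List Int)) (idx : Int) : List Int :=
  (PySem.List.pyGet? poses idx).getD []

-- 'while i < 20: if poseid - i < 0: i = 100; break / if len(poses[poseid-i])>0: break / i += 1'
def backLoop (poses : List (List Int)) (poseid : Int) (i : Int) : Int :=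
  if _h : i < 20 then
    if poseid - i < 0 then 100
    else if (pvAt poses (poseid - i)).length > 0 then i
    else backLoop poses poseid (i + 1)
  else i
termination_by (20 - i).toNat
decreasing_by omega

-- 'while j < 20: if poseid + j > pmax: j = 100; break / if len(poses[poseid+j])>0: break / j += 1'
def fwdLoop (poses : List (List Int)) (poseid pmax : Int) (j : Int) : Int :=
  if _h : j < 20 then
    if poseid + j > pmax then 100
    else if (pvAt poses (poseid + j)).length > 0 then j
    else fwdLoop poses poseid pmax (j + 1)
  else j
termination_by (20 - j).toNat
decreasing_by omega

def find_pose (poses : List (List Int)) (poseid : Int) : List Int :=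
  if (pvAt poses poseid).length > 0 then pvAt poses poseid
  else
    let pmax : Int := (poses.length : Int) - 1
    let i := backLoop poses poseid 1
    let j := fwdLoop poses poseid pmax 1
    if i > 19 ∧ j > 19 then []
    else if i < j then pvAt poses (poseid - i)
    else pvAt poses (poseid + j)

-- ===== PORT B =====
-- 'for d in range(1, 20): forward check, then backward check; else return []'
def expandLoop (poses : List (List Int)) (poseid last d : Int) : List Int :=
  if _h : d < 20 then
    if poseid + d ≤ last ∧ pvAt poses (poseid + d) ≠ [] then pvAt poses (poseid + d)
    else if poseid - d ≥ 0 ∧ pvAt poses (poseid - d) ≠ [] then pvAt poses (poseid - d)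
    else expandLoop poses poseid last (d + 1)
  else []
termination_by (20 - d).toNat
decreasing_by omega

def find_pose_alt (poses : List (List Int)) (poseid : Int) : List Int :=
  if pvAt poses poseid ≠ [] then pvAt poses poseid
  else expandLoop poses poseid ((poses.length : Int) - 1) 1

-- ===== PRECONDITION & SPEC =====
-- Pre_ excludes exactly the inputs where Python A raises IndexError on poses[poseid]
-- (poseid out of the range -len(poses) .. len(poses)-1, including empty poses).
def Pre_find_pose (poses : List (List Int)) (poseid : Int) : Prop :=
  -(poses.length : Int) ≤ poseid ∧ poseid < (poses.length : Int)
instance (poses : List (List Int)) (poseid : Int) : Decidable (Pre_find_pose poses poseid) := by unfold Pre_find_pose; infer_instance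

def pvWitness_find_pose : List (List Int) × Int := ([[], [3, 4], []], 0)

def Spec_find_pose (poses : List (List Int)) (poseid : Int) (out : List Int) : Prop := out = find_pose_alt poses poseid
instance (poses : List (List Int)) (poseid : Int) (out : List Int) : Decidable (Spec_find_pose poses poseid out) := by unfold Spec_find_pose; infer_instance

-- ===== CLAIM (what is proved, stated in full; the proofs are below) =====
def Claim_equal_find_pose : Prop := ∀ (poses : List (List Int)) (poseid : Int), Dom_find_pose poses poseid → Pre_find_pose poses poseid → Spec_find_pose poses poseid (find_pose poses poseid)

-- ===== LEMMAS AND PROOFS =====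

-- A's final combination step, as a function of the two loop results
def comb (poses : List (List Int)) (poseid i j : Int) : List Int :=
  if i > 19 ∧ j > 19 then []
  else if i < j then pvAt poses (poseid - i)
  else pvAt poses (poseid + j)

lemma backLoop_ge (poses : List (List Int)) (poseid : Int) :
    ∀ i, i ≤ backLoop poses poseid i := by
  intro i
  induction i using backLoop.induct poses poseid with
  | case1 i h1 h2 => rw [backLoop]; simp [h1, h2]; omega
  | case2 i h1 h2 h3 => rw [backLoop]; simp [h1, h2, h3]
  | case3 i h1 h2 h3 ih => rw [backLoop]; simp [h1, h2, h3]; omega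
  | case4 i h1 => rw [backLoop]; simp [h1]

lemma fwdLoop_ge (poses : List (List Int)) (poseid pmax : Int) :
    ∀ j, j ≤ fwdLoop poses poseid pmax j := by
  intro j
  induction j using fwdLoop.induct poses poseid pmax with
  | case1 j h1 h2 => rw [fwdLoop]; simp [h1, h2]; omega
  | case2 j h1 h2 h3 => rw [fwdLoop]; simp [h1, h2, h3]
  | case3 j h1 h2 h3 ih => rw [fwdLoop]; simp [h1, h2, h3]; omega
  | case4 j h1 => rw [fwdLoop]; simp [h1]

lemma backLoop_stuck (poses : List (List Int)) (poseid i : Int) (h : poseid - i < 0) :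
    19 < backLoop poses poseid i := by
  rw [backLoop]
  split
  · omega
  · omega

lemma fwdLoop_stuck (poses : List (List Int)) (poseid pmax j : Int) (h : poseid + j > pmax) :
    19 < fwdLoop poses poseid pmax j := by
  rw [fwdLoop]
  split
  · omega
  · omega

lemma comb_high_i (poses : List (List Int)) (poseid i i' j : Int)
    (h : 19 < i) (h' : 19 < i') : comb poses poseid i j = comb poses poseid i' j := by
  unfold comb
  split_ifs <;> first | rfl | omega

lemma comb_high_j (poses : List (List Int)) (poseid i j j' : Int)
    (h : 19 < j) (h' : 19 < j') : comb poses poseid i j = comb poses poseid i j' := by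
  unfold comb
  split_ifs <;> first | rfl | omega

lemma expand_eq_comb (poses : List (List Int)) (poseid last : Int) :
    ∀ d, 1 ≤ d →
      expandLoop poses poseid last d
        = comb poses poseid (backLoop poses poseid d) (fwdLoop poses poseid last d) := by
  intro d
  induction d using expandLoop.induct poses poseid last with
  | case1 d hd hf =>
    -- forward hit at radius d
    intro h1
    rw [expandLoop]
    have hj : fwdLoop poses poseid last d = d := by
      rw [fwdLoop]
      simp only [hd, dif_pos]
      have : ¬ poseid + d > last := by omega
      simp [this, List.length_pos_iff.mpr hf.2]
    have hi := backLoop_ge poses poseid d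
    simp only [hd, dif_pos, if_pos hf]
    unfold comb
    rw [hj]
    have : ¬ (backLoop poses poseid d > 19 ∧ d > 19) := by omega
    rw [if_neg this, if_neg (by omega)]
  | case2 d hd hf hb =>
    -- backward hit at radius d (forward missed)
    intro h1
    rw [expandLoop]
    have hi : backLoop poses poseid d = d := by
      rw [backLoop]
      simp only [hd, dif_pos]
      have : ¬ poseid - d < 0 := by omega
      simp [this, List.length_pos_iff.mpr hb.2]
    have hj : d < fwdLoop poses poseid last d := by
      rw [fwdLoop]
      simp only [hd, dif_pos]
      rcases not_and_or.mp hf with hout | hemp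
      · rw [if_pos (by omega)]; omega
      · have hlen : ¬ (pvAt poses (poseid + d)).length > 0 := by
          simp only [not_not] at hemp; simp [hemp]
        by_cases hpm : poseid + d > last
        · rw [if_pos hpm]; omega
        · rw [if_neg hpm, if_neg hlen]
          have := fwdLoop_ge poses poseid last (d + 1)
          omega
    simp only [hd, dif_pos, if_neg hf, if_pos hb]
    unfold comb
    rw [hi, if_neg (by omega), if_pos hj]
  | case3 d hd hf hb ih =>
    -- both miss at radius d
    intro h1
    rw [expandLoop]
    simp only [hd, dif_pos, if_neg hf, if_neg hb]
    rw [ih (by omega)]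
    by_cases hbo : poseid - d < 0
    · -- backward permanently out of range
      have hi : backLoop poses poseid d = 100 := by
        rw [backLoop]; simp [hd, hbo]
      have hi' : 19 < backLoop poses poseid (d + 1) := backLoop_stuck _ _ _ (by omega)
      by_cases hfo : poseid + d > last
      · have hj' : 19 < fwdLoop poses poseid last (d + 1) := fwdLoop_stuck _ _ _ _ (by omega)
        have hj : fwdLoop poses poseid last d = 100 := by
          rw [fwdLoop]; simp [hd, hfo]
        rw [hi, hj]
        exact (comb_high_i poses poseid _ 100 _ hi' (by omega)).trans
          (comb_high_j poses poseid 100 _ 100 hj' (by omega))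
      · have hemp : ¬ (pvAt poses (poseid + d)).length > 0 := by
          rcases not_and_or.mp hf with h | h
          · omega
          · simp only [not_not] at h; simp [h]
        have hj : fwdLoop poses poseid last d = fwdLoop poses poseid last (d + 1) := by
          rw [fwdLoop]; simp only [hd, dif_pos]; rw [if_neg hfo, if_neg hemp]
        rw [hi, hj]
        exact comb_high_i poses poseid _ 100 _ hi' (by omega)
    · -- backward in range and empty
      have hbemp : ¬ (pvAt poses (poseid - d)).length > 0 := by
        rcases not_and_or.mp hb with h | h
        · omega
        · simp only [not_not] at h; simp [h]
      have hi : backLoop poses poseid d = backLoop poses poseid (d + 1) := by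
        rw [backLoop]; simp only [hd, dif_pos]; rw [if_neg hbo, if_neg hbemp]
      by_cases hfo : poseid + d > last
      · have hj : fwdLoop poses poseid last d = 100 := by
          rw [fwdLoop]; simp [hd, hfo]
        have hj' : 19 < fwdLoop poses poseid last (d + 1) := fwdLoop_stuck _ _ _ _ (by omega)
        rw [hi, hj]
        exact comb_high_j poses poseid _ _ 100 hj' (by omega)
      · have hemp : ¬ (pvAt poses (poseid + d)).length > 0 := by
          rcases not_and_or.mp hf with h | h
          · omega
          · simp only [not_not] at h; simp [h]
        have hj : fwdLoop poses poseid last d = fwdLoop poses poseid last (d + 1) := by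
          rw [fwdLoop]; simp only [hd, dif_pos]; rw [if_neg hfo, if_neg hemp]
        rw [hi, hj]
  | case4 d hd =>
    -- d = 20 (loop exhausted)
    intro h1
    rw [expandLoop]
    have hi : backLoop poses poseid d = d := by rw [backLoop]; simp [hd]
    have hj : fwdLoop poses poseid last d = d := by rw [fwdLoop]; simp [hd]
    simp only [hd, dif_neg, not_false_iff]
    unfold comb
    rw [hi, hj, if_pos (by omega)]

-- ===== VERDICT (by name: the statement is the Claim_ definition above) =====
theorem find_pose_spec : Claim_equal_find_pose := by
  intro poses poseid _hdom _hpre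
  unfold Spec_find_pose find_pose find_pose_alt
  by_cases hcur : pvAt poses poseid = []
  · have h1 : ¬ (pvAt poses poseid).length > 0 := by simp [hcur]
    have h2 : ¬ pvAt poses poseid ≠ [] := by simp [hcur]
    rw [if_neg h1, if_neg h2,
        expand_eq_comb poses poseid ((poses.length : Int) - 1) 1 (by omega)]
    rfl
  · rw [if_pos (by simpa using List.length_pos_iff.mpr hcur), if_pos (by simpa using hcur)]
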